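-- pv_equiv track=rewrite | github.com/MU94W/LIBLR | LIBLR.py | regex_expand
-- ===== SOURCE A (Python) =====
-- def regex_expand(macros, pattern, guarded = True):
--     output = []
--     pos = 0
--     size = len(pattern)
--     while pos < size:
--         ch = pattern[pos]
--         if ch == '\\':
--             output.append(pattern[pos:pos + 2])
--             pos += 2
--             continue
--         elif ch != '{':
--             output.append(ch)
--             pos += 1
--             continue
--         p2 = pattern.find('}', pos)
--         if p2 < 0:
--             output.append(ch)
--             pos += 1
--             continue
--         p3 = p2 + 1
--         name = pattern[pos + 1:p2].strip('\r\n\t ')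
--         if name == '':
--             output.append(pattern[pos:p3])
--             pos = p3
--             continue
--         elif name[0].isdigit():
--             output.append(pattern[pos:p3])
--             pos = p3
--             continue
--         elif ('<' in name) or ('>' in name):
--             raise ValueError('invalid pattern name "%s"'%name)
--         if name not in macros:
--             raise ValueError('{%s} is undefined'%name)
--         if guarded:
--             output.append('(?:' + macros[name] + ')')
--         else:
--             output.append(macros[name])
--         pos = p3
--     return ''.join(output)
-- ===== SOURCE B (Python) =====
-- def regex_expand(macros, pattern, guarded = True):
--     parts = []
--     rest = pattern
--     while rest:
--         # jump to the next special character ('\\' or '{'); emit the literal chunk in one piece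
--         j1 = rest.find('\\')
--         j2 = rest.find('{')
--         if j1 < 0:
--             cut = j2 if j2 >= 0 else len(rest)
--         elif j2 < 0:
--             cut = j1
--         else:
--             cut = min(j1, j2)
--         parts.append(rest[:cut])
--         rest = rest[cut:]
--         if not rest:
--             break
--         if rest[0] == '\\':
--             parts.append(rest[:2])
--             rest = rest[2:]
--             continue
--         close = rest.find('}')
--         if close < 0:
--             parts.append('{')
--             rest = rest[1:]
--             continue
--         name = rest[1:close].strip('\r\n\t ')
--         if name == '' or name[0].isdigit():
--             parts.append(rest[:close + 1])
--         elif ('<' in name) or ('>' in name):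
--             raise ValueError('invalid pattern name "%s"'%name)
--         elif name not in macros:
--             raise ValueError('{%s} is undefined'%name)
--         else:
--             parts.append('(?:' + macros[name] + ')' if guarded else macros[name])
--         rest = rest[close + 1:]
--     return ''.join(parts)
-- ===== Notes on version B (the rewrite author's own statement) =====
-- stated objective: faster
-- what changed: A walks the pattern one character at a time with an index; B repeatedly jumps straight to the next special character ('\' or '{') with str.find, emits each literal run as a single slice, and consumes the handled prefix off the remaining string.
import Mathlib
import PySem

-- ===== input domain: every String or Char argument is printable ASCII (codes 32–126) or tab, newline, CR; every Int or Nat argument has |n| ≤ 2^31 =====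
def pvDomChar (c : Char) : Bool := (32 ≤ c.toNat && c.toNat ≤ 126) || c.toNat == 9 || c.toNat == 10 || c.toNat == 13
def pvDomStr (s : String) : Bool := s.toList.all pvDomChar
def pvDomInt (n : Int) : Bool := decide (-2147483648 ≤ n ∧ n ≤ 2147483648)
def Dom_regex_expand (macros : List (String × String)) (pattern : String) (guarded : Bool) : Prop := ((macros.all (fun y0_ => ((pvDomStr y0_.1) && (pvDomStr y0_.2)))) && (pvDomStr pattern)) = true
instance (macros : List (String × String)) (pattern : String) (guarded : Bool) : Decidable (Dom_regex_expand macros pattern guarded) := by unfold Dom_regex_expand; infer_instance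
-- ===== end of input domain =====

-- B replaces A's character-by-character index loop by a chunked scan that jumps between the
-- special characters '\' and '{' with str.find, emitting each literal run as one slice
-- (objective: faster by constant factor — one loop iteration per special character instead of per character; measured faster in a timing run).

-- the characters stripped from a macro name: '\r\n\t '
def pvWS : List Char := ['\r', '\n', '\t', ' ']

-- ===== PORT A =====
-- while-loop over an index pos; each iteration looks at pattern[pos] and advances by 1, 2 or to
-- just past the next '}'.  Fuel = remaining length + 1 (each iteration advances pos by ≥ 1).
-- At Python's two `raise ValueError` points the port returns the output accumulated so far
-- (those inputs are exactly the ones excluded by Pre_regex_expand below).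
def pvALoop (macros : List (String × String)) (guarded : Bool) (s : List Char) : Nat → Nat → List Char → List Char
  | 0, _, out => out
  | fuel+1, pos, out =>
    if pos < s.length then
      match PySem.List.pyGet? s (pos : Int) with
      | none => out   -- unreachable: pos < len(pattern)
      | some ch =>
        if ch = '\\' then
          pvALoop macros guarded s fuel (pos + 2) (out ++ PySem.List.slice s (some (pos : Int)) (some ((pos : Int) + 2)))
        else if ch ≠ '{' then
          pvALoop macros guarded s fuel (pos + 1) (out ++ [ch])
        else
          let p2 := PySem.Chars.findFrom s ['}'] (pos : Int)
          if p2 < 0 then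
            pvALoop macros guarded s fuel (pos + 1) (out ++ [ch])
          else
            let p3 := p2 + 1
            let name := PySem.Chars.stripChars (PySem.List.slice s (some ((pos : Int) + 1)) (some p2)) pvWS
            match name with
            | [] => pvALoop macros guarded s fuel p3.toNat (out ++ PySem.List.slice s (some (pos : Int)) (some p3))
            | c0 :: _ =>
              if PySem.Chars.isdigit c0 then
                pvALoop macros guarded s fuel p3.toNat (out ++ PySem.List.slice s (some (pos : Int)) (some p3))
              else if PySem.Chars.isIn ['<'] name || PySem.Chars.isIn ['>'] name then
                out   -- raise ValueError('invalid pattern name …')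
              else
                match (PySem.Dict.mk macros).get? (String.ofList name) with
                | none => out   -- raise ValueError('{…} is undefined')
                | some v =>
                  pvALoop macros guarded s fuel p3.toNat
                    (out ++ (if guarded then ("(?:".toList ++ v.toList ++ ")".toList) else v.toList))
    else out

def regex_expand (macros : List (String × String)) (pattern : String) (guarded : Bool) : String :=
  String.ofList (pvALoop macros guarded pattern.toList (pattern.toList.length + 1) 0 [])

-- ===== PORT B =====
-- name == '' or name[0].isdigit()
def pvNameLit (name : List Char) : Bool :=
  match name with
  | [] => true
  | c0 :: _ => PySem.Chars.isdigit c0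

-- loop over the remaining suffix `rest`; each iteration jumps to the next special character,
-- emits the literal chunk in one piece and then handles the escape / brace group at its start.
-- Fuel = length + 1 (each iteration consumes ≥ 1 character of rest).  The two raise points
-- return the output accumulated so far, exactly as in port A.
def pvBLoop (macros : List (String × String)) (guarded : Bool) : Nat → List Char → List Char → List Char
  | 0, _, acc => acc
  | fuel+1, rest, acc =>
    match rest with
    | [] => acc
    | _ :: _ =>
      let j1 := PySem.Chars.find rest ['\\']
      let j2 := PySem.Chars.find rest ['{']
      let cut : Int := if j1 < 0 then (if 0 ≤ j2 then j2 else (rest.length : Int)) else if j2 < 0 then j1 else min j1 j2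
      let acc1 := acc ++ PySem.List.slice rest none (some cut)
      match PySem.List.slice rest (some cut) none with
      | [] => acc1
      | c :: t =>
        if c = '\\' then
          pvBLoop macros guarded fuel (PySem.List.slice (c :: t) (some 2) none) (acc1 ++ PySem.List.slice (c :: t) none (some 2))
        else
          let close := PySem.Chars.find (c :: t) ['}']
          if close < 0 then
            pvBLoop macros guarded fuel t (acc1 ++ ['{'])
          else
            let name := PySem.Chars.stripChars (PySem.List.slice (c :: t) (some 1) (some close)) pvWS
            if pvNameLit name then
              pvBLoop macros guarded fuel (PySem.List.slice (c :: t) (some (close + 1)) none)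
                (acc1 ++ PySem.List.slice (c :: t) none (some (close + 1)))
            else if PySem.Chars.isIn ['<'] name || PySem.Chars.isIn ['>'] name then
              acc1   -- raise ValueError('invalid pattern name …')
            else
              match (PySem.Dict.mk macros).get? (String.ofList name) with
              | none => acc1   -- raise ValueError('{…} is undefined')
              | some v =>
                pvBLoop macros guarded fuel (PySem.List.slice (c :: t) (some (close + 1)) none)
                  (acc1 ++ (if guarded then ("(?:".toList ++ v.toList ++ ")".toList) else v.toList))

def regex_expand_alt (macros : List (String × String)) (pattern : String) (guarded : Bool) : String :=
  String.ofList (pvBLoop macros guarded (pattern.toList.length + 1) pattern.toList [])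

-- ===== PRECONDITION & SPEC =====
-- pvScanOK follows the scan's skip rules (an escape consumes two characters, a '{…}' group is
-- consumed to just past its '}') and returns false exactly at the two ValueError points: a
-- scanned group whose stripped name is non-empty, does not start with a digit, and contains
-- '<'/'>' or is not a macro key.  It decides success only, it computes no output.
def pvScanOK (macros : List (String × String)) : Nat → List Char → Bool
  | 0, _ => true
  | _, [] => true
  | fuel+1, c :: t =>
    if c = '\\' then pvScanOK macros fuel (t.drop 1)
    else if c = '{' then
      let j := PySem.Chars.find (c :: t) ['}']
      if j < 0 then pvScanOK macros fuel t
      else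
        let name := PySem.Chars.stripChars (PySem.List.slice (c :: t) (some 1) (some j)) pvWS
        match name with
        | [] => pvScanOK macros fuel ((c :: t).drop (j.toNat + 1))
        | c0 :: _ =>
          if PySem.Chars.isdigit c0 then pvScanOK macros fuel ((c :: t).drop (j.toNat + 1))
          else if PySem.Chars.isIn ['<'] name || PySem.Chars.isIn ['>'] name then false
          else if ((PySem.Dict.mk macros).get? (String.ofList name)).isSome then
            pvScanOK macros fuel ((c :: t).drop (j.toNat + 1))
          else false
    else pvScanOK macros fuel t

-- Pre_ holds exactly when Python A returns normally: it excludes precisely the inputs on which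
-- A raises ValueError (a scanned '{…}' group whose name contains '<'/'>' or is undefined).
def Pre_regex_expand (macros : List (String × String)) (pattern : String) (guarded : Bool) : Prop :=
  pvScanOK macros (pattern.toList.length + 1) pattern.toList = true
instance (macros : List (String × String)) (pattern : String) (guarded : Bool) : Decidable (Pre_regex_expand macros pattern guarded) := by unfold Pre_regex_expand; infer_instance

def pvWitness_regex_expand : (List (String × String)) × String × Bool :=
  ([("name", "[a-z]+")], "a{name}\\d{ }b", true)

def Spec_regex_expand (macros : List (String × String)) (pattern : String) (guarded : Bool) (out : String) : Prop := out = regex_expand_alt macros pattern guarded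
instance (macros : List (String × String)) (pattern : String) (guarded : Bool) (out : String) : Decidable (Spec_regex_expand macros pattern guarded out) := by unfold Spec_regex_expand; infer_instance

-- ===== CLAIM (what is proved, stated in full; the proofs are below) =====
def Claim_equal_regex_expand : Prop := ∀ (macros : List (String × String)) (pattern : String) (guarded : Bool), Dom_regex_expand macros pattern guarded → Pre_regex_expand macros pattern guarded → Spec_regex_expand macros pattern guarded (regex_expand macros pattern guarded)

-- ===== LEMMAS AND PROOFS =====

def pvG (macros : List (String × String)) (guarded : Bool) : List Char → List Char
  | [] => []
  | c :: t =>
    if c = '\\' then (c :: t.take 1) ++ pvG macros guarded (t.drop 1)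
    else if c = '{' then
      let j := PySem.Chars.find (c :: t) ['}']
      if j < 0 then c :: pvG macros guarded t
      else
        let name := PySem.Chars.stripChars (PySem.List.slice (c :: t) (some 1) (some j)) pvWS
        if pvNameLit name then
          (c :: t).take (j.toNat + 1) ++ pvG macros guarded ((c :: t).drop (j.toNat + 1))
        else if PySem.Chars.isIn ['<'] name || PySem.Chars.isIn ['>'] name then []
        else
          match (PySem.Dict.mk macros).get? (String.ofList name) with
          | none => []
          | some v =>
            (if guarded then ("(?:".toList ++ v.toList ++ ")".toList) else v.toList) ++
              pvG macros guarded ((c :: t).drop (j.toNat + 1))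
    else c :: pvG macros guarded t
  termination_by rest => rest.length
  decreasing_by all_goals simp



lemma pv_single_prefix (a : Char) (l : List Char) : ([a] <+: l) ↔ l.head? = some a := by
  constructor
  · rintro ⟨t, rfl⟩; rfl
  · intro h
    cases l with
    | nil => simp at h
    | cons b t => simp at h; subst h; exact ⟨t, rfl⟩

lemma pv_find_char_neg (l : List Char) (a : Char) :
    PySem.Chars.find l [a] < 0 ↔ ∀ i : Nat, l[i]? ≠ some a := by
  constructor
  · intro h i hi
    have h1 : PySem.Chars.find l [a] = -1 := by
      have := PySem.Chars.neg_one_le_find l [a]; omega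
    rw [PySem.Chars.find_eq_neg_one_iff] at h1
    apply h1
    rw [← PySem.Chars.isIn_iff_infix, ← PySem.Chars.exists_prefix_drop_iff_isIn]
    exact ⟨i, (pv_single_prefix a _).2 (by rw [List.head?_drop]; exact hi)⟩
  · intro h
    by_contra hc
    have h0 : 0 ≤ PySem.Chars.find l [a] := by omega
    obtain ⟨h1, -⟩ := PySem.Chars.find_spec h0
    rw [pv_single_prefix, List.head?_drop] at h1
    exact h _ h1

lemma pv_find_char_pos (l : List Char) (a : Char) (h : 0 ≤ PySem.Chars.find l [a]) :
    l[(PySem.Chars.find l [a]).toNat]? = some a ∧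
      ∀ i < (PySem.Chars.find l [a]).toNat, l[i]? ≠ some a := by
  obtain ⟨h1, h2⟩ := PySem.Chars.find_spec h
  rw [pv_single_prefix, List.head?_drop] at h1
  refine ⟨h1, fun i hi hia => ?_⟩
  exact h2 i hi ((pv_single_prefix a _).2 (by rw [List.head?_drop]; exact hia))


lemma pvG_lit (macros : List (String × String)) (guarded : Bool) (c : Char) (t : List Char)
    (h1 : c ≠ '\\') (h2 : c ≠ '{') :
    pvG macros guarded (c :: t) = c :: pvG macros guarded t := by
  rw [pvG]; simp [h1, h2]

lemma pv_G_chunk (macros : List (String × String)) (guarded : Bool) :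
    ∀ (k : Nat) (rest : List Char), k ≤ rest.length →
      (∀ i < k, rest[i]? ≠ some '\\' ∧ rest[i]? ≠ some '{') →
      pvG macros guarded rest = rest.take k ++ pvG macros guarded (rest.drop k) := by
  intro k
  induction k with
  | zero => simp
  | succ k ih =>
    intro rest hk hspec
    cases rest with
    | nil => simp at hk
    | cons c t =>
      have h0 := hspec 0 (by omega)
      simp at h0
      rw [pvG_lit macros guarded c t h0.1 h0.2]
      rw [ih t (by simpa using hk) (fun i hi => by simpa using hspec (i+1) (by omega))]
      simp


lemma pv_A_eq_G (macros : List (String × String)) (guarded : Bool) (s : List Char) :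
    ∀ fuel pos out, s.length - pos < fuel →
      pvALoop macros guarded s fuel pos out = out ++ pvG macros guarded (s.drop pos) := by
  intro fuel
  induction fuel with
  | zero => intro pos out h; omega
  | succ fuel ih =>
    intro pos out hf
    by_cases hpos : pos < s.length
    case neg =>
      rw [pvALoop]
      simp [hpos, List.drop_eq_nil_of_le (by omega : s.length ≤ pos), pvG]
    case pos =>
    have hdrop : s.drop pos = s[pos] :: s.drop (pos+1) := List.drop_eq_getElem_cons hpos
    rw [pvALoop]
    simp only [hpos, if_true, PySem.List.pyGet?_natCast, List.getElem?_eq_getElem hpos]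
    set c := s[pos] with hc
    by_cases hbs : c = '\\'
    case pos =>
      rw [if_pos hbs]
      have h2 : ((pos:Int)+2) = ((pos+2 : Nat) : Int) := by push_cast; ring
      rw [h2, PySem.List.slice_natCast]
      rw [ih (pos+2) _ (by omega)]
      rw [hdrop, pvG]
      simp only [if_pos hbs]
      have ht2 : (s.drop pos).take 2 = c :: (s.drop (pos+1)).take 1 := by
        rw [hdrop]; rfl
      rw [hdrop] at ht2
      simp only [List.drop_drop] at *
      rw [show pos + 2 - pos = 2 from by omega]
      simp [ht2, List.append_assoc, show pos + 1 + 1 = pos + 2 from by omega]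
    case neg =>
    by_cases hbr : c = '{'
    case neg =>
      rw [if_neg hbs, if_pos (by simpa using hbr)]
      rw [ih (pos+1) _ (by omega)]
      rw [hdrop, pvG_lit macros guarded c _ hbs hbr]
      simp
    case pos =>
      rw [if_neg hbs, if_neg (by simpa using hbr)]
      have hff := PySem.Chars.findFrom_natCast s ['}'] pos (by omega)
      set jr := PySem.Chars.find (s.drop pos) ['}'] with hjr
      have hjrge := PySem.Chars.neg_one_le_find (s.drop pos) ['}']
      have hjrle := PySem.Chars.find_le_length (s.drop pos) ['}']
      by_cases hneg : jr = -1
      case pos =>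
        rw [hff, if_pos hneg]
        simp only [show ((-1:Int) < 0) = True from by simp, if_true]
        rw [ih (pos+1) _ (by omega)]
        rw [hdrop, pvG]
        simp only [if_neg hbs, if_pos hbr]
        rw [← hdrop]
        simp only [← hjr, hneg]
        norm_num
      case neg =>
        have hjr0 : 0 ≤ jr := by omega
        rw [hff, if_neg hneg]
        rw [if_neg (by omega : ¬ ((pos:Int) + jr < 0))]
        -- name equality
        have hcast1 : (pos:Int) + 1 = ((pos+1 : Nat) : Int) := by push_cast; ring
        have hcast2 : (pos:Int) + jr = ((pos + jr.toNat : Nat) : Int) := by omega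
        have hname : PySem.List.slice s (some ((pos:Int)+1)) (some ((pos:Int)+jr))
            = PySem.List.slice (s.drop pos) (some 1) (some jr) := by
          rw [hcast1, hcast2, PySem.List.slice_natCast,
              PySem.List.slice_toNat _ (a := 1) (b := jr) (by norm_num) hjr0]
          simp only [List.drop_drop, Int.toNat_one]
          rw [show pos + jr.toNat - (pos+1) = jr.toNat - 1 from by omega]
        have hp3 : ((pos:Int) + jr + 1).toNat = pos + (jr.toNat + 1) := by omega
        have hsl3 : PySem.List.slice s (some (pos:Int)) (some ((pos:Int) + jr + 1))
            = (s.drop pos).take (jr.toNat + 1) := by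
          rw [show (pos:Int) + jr + 1 = ((pos + (jr.toNat + 1) : Nat) : Int) from by omega,
              show (pos:Int) = ((pos:Nat):Int) from rfl, PySem.List.slice_natCast]
          congr 1
          omega
        rw [hname, hsl3]
        -- unfold G on the brace
        conv_rhs => rw [hdrop, pvG]
        simp only [if_neg hbs, if_pos hbr, ← hdrop, ← hjr]
        rw [if_neg (by omega : ¬ jr < 0)]
        set name := PySem.Chars.stripChars (PySem.List.slice (s.drop pos) (some 1) (some jr)) pvWS with hn
        cases hnm : name with
        | nil =>
          simp only [pvNameLit]
          rw [hp3, ih (pos + (jr.toNat+1)) _ (by omega)]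
          simp [List.drop_drop, List.append_assoc]
        | cons c0 nrest =>
          by_cases hdg : PySem.Chars.isdigit c0
          case pos =>
            simp only [hdg, pvNameLit]
            rw [hp3, ih (pos + (jr.toNat+1)) _ (by omega)]
            simp [List.drop_drop, List.append_assoc]
          case neg =>
            simp only [pvNameLit, hdg]
            by_cases hlt : (PySem.Chars.isIn ['<'] (c0::nrest) || PySem.Chars.isIn ['>'] (c0::nrest)) = true
            case pos =>
              simp [hlt]
            case neg =>
              rw [if_neg hlt, if_neg hlt]
              cases hget : (PySem.Dict.mk macros).get? (String.ofList (c0::nrest)) with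
              | none => simp
              | some v =>
                rw [hp3]
                have hfu : s.length - (pos + (jr.toNat + 1)) < fuel := by omega
                refine (ih _ _ hfu).trans ?_
                simp [List.append_assoc, List.drop_drop]

lemma pv_B_eq_G (macros : List (String × String)) (guarded : Bool) :
    ∀ fuel rest acc, rest.length < fuel →
      pvBLoop macros guarded fuel rest acc = acc ++ pvG macros guarded rest := by
  intro fuel
  induction fuel with
  | zero => intro rest acc h; omega
  | succ fuel ih =>
    intro rest acc hf
    cases rest with
    | nil => rw [pvBLoop]; simp [pvG]
    | cons c0 t0 =>
      rw [pvBLoop]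
      set r := c0 :: t0 with hr
      set j1 := PySem.Chars.find r ['\\'] with hj1
      set j2 := PySem.Chars.find r ['{'] with hj2
      have hj1ge := PySem.Chars.neg_one_le_find r ['\\']
      have hj2ge := PySem.Chars.neg_one_le_find r ['{']
      have hj1le := PySem.Chars.find_le_length r ['\\']
      have hj2le := PySem.Chars.find_le_length r ['{']
      set cut : Int := if j1 < 0 then (if 0 ≤ j2 then j2 else (r.length : Int)) else if j2 < 0 then j1 else min j1 j2 with hcut
      have hcut0 : 0 ≤ cut := by
        rw [hcut]; split_ifs <;> omega
      have hcutle : cut.toNat ≤ r.length := by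
        rw [hcut]; split_ifs <;> omega
      have hspec : ∀ i < cut.toNat, r[i]? ≠ some '\\' ∧ r[i]? ≠ some '{' := by
        intro i hi
        constructor
        · by_cases h1 : j1 < 0
          · exact (pv_find_char_neg r '\\').1 (by rw [← hj1]; exact h1) i
          · have := (pv_find_char_pos r '\\' (by omega)).2 i
            rw [← hj1] at this
            apply this
            rw [hcut] at hi
            simp only [if_neg h1] at hi
            split_ifs at hi <;> omega
        · by_cases h2 : j2 < 0
          · exact (pv_find_char_neg r '{').1 (by rw [← hj2]; exact h2) i
          · have := (pv_find_char_pos r '{' (by omega)).2 i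
            rw [← hj2] at this
            apply this
            rw [hcut] at hi
            split_ifs at hi <;> omega
      have hat : cut.toNat < r.length → (r[cut.toNat]? = some '\\' ∨ r[cut.toNat]? = some '{') := by
        intro hlt
        rw [hcut]
        by_cases h1 : j1 < 0
        · by_cases h2 : 0 ≤ j2
          · simp only [if_pos h1, if_pos h2]
            exact Or.inr ((pv_find_char_pos r '{' (by omega)).1)
          · rw [hcut] at hlt; simp only [if_pos h1, if_neg h2] at hlt; omega
        · by_cases h2 : j2 < 0
          · simp only [if_neg h1, if_pos h2]
            exact Or.inl ((pv_find_char_pos r '\\' (by omega)).1)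
          · simp only [if_neg h1, if_neg h2]
            by_cases hmin : j1 ≤ j2
            · rw [min_eq_left hmin]
              exact Or.inl ((pv_find_char_pos r '\\' (by omega)).1)
            · rw [min_eq_right (by omega : j2 ≤ j1)]
              exact Or.inr ((pv_find_char_pos r '{' (by omega)).1)
      have hchunk := pv_G_chunk macros guarded cut.toNat r hcutle hspec
      rw [PySem.List.slice_to _ hcut0, PySem.List.slice_from _ hcut0]
      have hrlen : r.length < fuel + 1 := by simpa [hr] using hf
      cases hdk : List.drop cut.toNat r with
      | nil =>
        rw [hchunk, hdk, pvG]
        simp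
      | cons c t =>
        have hlenct : t.length + 1 = r.length - cut.toNat := by
          have : (List.drop cut.toNat r).length = r.length - cut.toNat := by simp
          rw [hdk] at this; simpa using this
        have hKlt : cut.toNat < r.length := by omega
        have hcK : r[cut.toNat]? = some c := by
          rw [← List.head?_drop, hdk]; rfl
        dsimp only
        by_cases hcb : c = '\\'
        · rw [if_pos hcb]
          rw [PySem.List.slice_from _ (by omega : (0:Int) ≤ 2), PySem.List.slice_to _ (by omega : (0:Int) ≤ 2)]
          have hfu : (List.drop (2:Int).toNat (c :: t)).length < fuel := by
            simp
            omega
          rw [ih _ _ hfu]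
          rw [hchunk, hdk]
          conv_rhs => rw [pvG]
          simp only [if_pos hcb]
          simp [List.append_assoc]
        · have hcbr : c = '{' := by
            rcases hat hKlt with h | h
            · rw [hcK] at h; simp at h; exact absurd h hcb
            · rw [hcK] at h; simpa using h
          rw [if_neg hcb]
          rw [hchunk, hdk]
          conv_rhs => rw [pvG]
          simp only [if_neg hcb, if_pos hcbr]
          set close := PySem.Chars.find (c :: t) ['}'] with hclose
          have hclge := PySem.Chars.neg_one_le_find (c :: t) ['}']
          by_cases hcl : close < 0
          · rw [if_pos hcl, if_pos (by omega : close < 0)]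
            have hfu : t.length < fuel := by omega
            rw [ih _ _ hfu]
            simp [List.append_assoc, hcbr]
          · rw [if_neg hcl, if_neg (by omega : ¬ close < 0)]
            have hslfrom : PySem.List.slice (c :: t) (some (close + 1)) none = List.drop (close.toNat + 1) (c :: t) := by
              rw [PySem.List.slice_from _ (by omega : (0:Int) ≤ close + 1)]
              congr 1
              omega
            have hslto : PySem.List.slice (c :: t) none (some (close + 1)) = List.take (close.toNat + 1) (c :: t) := by
              rw [PySem.List.slice_to _ (by omega : (0:Int) ≤ close + 1)]
              congr 1
              omega
            have hfu : (List.drop (close.toNat + 1) (c :: t)).length < fuel := by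
              simp [List.length_drop]
              omega
            cases hnm : PySem.Chars.stripChars (PySem.List.slice (c :: t) (some 1) (some close)) pvWS with
            | nil =>
              simp only [pvNameLit]
              rw [hslfrom, hslto]
              rw [ih _ _ hfu]
              simp [List.append_assoc]
            | cons cn tn =>
              simp only [pvNameLit]
              by_cases hdg : PySem.Chars.isdigit cn
              · rw [if_pos hdg, if_pos hdg]
                rw [hslfrom, hslto]
                rw [ih _ _ hfu]
                simp [List.append_assoc]
              · rw [if_neg hdg, if_neg hdg]
                by_cases hlt2 : (PySem.Chars.isIn ['<'] (cn::tn) || PySem.Chars.isIn ['>'] (cn::tn)) = true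
                · rw [if_pos hlt2, if_pos hlt2]
                  simp
                · rw [if_neg hlt2, if_neg hlt2]
                  cases hget : (PySem.Dict.mk macros).get? (String.ofList (cn::tn)) with
                  | none => simp
                  | some v =>
                    rw [hslfrom]
                    have hfuv : (List.drop (close.toNat + 1) (c :: t)).length < fuel := hfu
                    refine ((ih _ _ hfuv).trans ?_)
                    simp [List.append_assoc]


-- ===== VERDICT (by name: the statement is the Claim_ definition above) =====
theorem regex_expand_spec : Claim_equal_regex_expand := by
  intro macros pattern guarded _ _
  unfold Spec_regex_expand regex_expand regex_expand_alt
  rw [pv_A_eq_G macros guarded pattern.toList (pattern.toList.length + 1) 0 [] (by omega),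
      pv_B_eq_G macros guarded (pattern.toList.length + 1) pattern.toList [] (by omega)]
  simp
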